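-- pv_equiv track=rewrite | github.com/D4RK228/Poker_fake | gotoproject/SuperAI_NAGIBATOR_2000.py | two_pairs
-- ===== SOURCE A (Python) =====
-- def two_pairs(player, data_cards, k_player):
--     data_comb = []
--     data_comb.append(data_cards[player*2 - 1])
--     data_comb.append(data_cards[player*2 - 2])
--     for i in range(5):
--         data_comb.append(data_cards[k_player*2 + i])
--     for i in range(7):
--         data_comb[i] = data_comb[i] % 13
--     for i in range(7):
--         if(data_comb[i] == 0):
--             data_comb[i] = 13
--     data_comb.sort()
--     data_comb.reverse()
--     s = 0
--     for i in range(6):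
--         if data_comb[i] == data_comb[i+1]:
--             s = data_comb[i]
--             data_comb[i] = -1
--             data_comb[i+1] = -1
--             break
--     data_comb.sort()
--     data_comb.reverse()
--     a = 0
--     for i in range(6):
--         if data_comb[i] == data_comb[i+1] and data_comb[i] != -1:
--             a = data_comb[i]
--             data_comb[i] = -1
--             data_comb[i+1] = -1
--             break
--     if a != 0 and s != 0:
--         data_comb.sort()
--         data_comb.reverse()
--         s *= 100
--         s += a
--         s *= 100
--         s += data_comb[0]
--         return s
--     else:
--         return 0
-- ===== SOURCE B (Python) =====
-- def two_pairs(player, data_cards, k_player):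
--     cards = [data_cards[player * 2 - 1], data_cards[player * 2 - 2]] + \
--             [data_cards[k_player * 2 + i] for i in range(5)]
--     ranks = [(c % 13) or 13 for c in cards]
--     pairs, singles = [], []
--     rest = sorted(ranks, reverse=True)
--     while rest:
--         if len(rest) >= 2 and rest[0] == rest[1]:
--             pairs.append(rest[0])
--             rest = rest[2:]
--         else:
--             singles.append(rest[0])
--             rest = rest[1:]
--     if len(pairs) < 2:
--         return 0
--     return 10000 * pairs[0] + 100 * pairs[1] + max(singles + pairs[2:])
-- ===== Notes on version B (the rewrite author's own statement) =====
-- stated objective: simpler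
-- what changed: A finds each pair by sorting, scanning for adjacent equals, overwriting the pair with -1 sentinels and re-sorting the whole hand twice more; B sorts the ranks descending once and makes a single greedy pass that splits the hand into pair ranks and single cards, then reads both pairs and the kicker straight off that split.
import Mathlib
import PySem

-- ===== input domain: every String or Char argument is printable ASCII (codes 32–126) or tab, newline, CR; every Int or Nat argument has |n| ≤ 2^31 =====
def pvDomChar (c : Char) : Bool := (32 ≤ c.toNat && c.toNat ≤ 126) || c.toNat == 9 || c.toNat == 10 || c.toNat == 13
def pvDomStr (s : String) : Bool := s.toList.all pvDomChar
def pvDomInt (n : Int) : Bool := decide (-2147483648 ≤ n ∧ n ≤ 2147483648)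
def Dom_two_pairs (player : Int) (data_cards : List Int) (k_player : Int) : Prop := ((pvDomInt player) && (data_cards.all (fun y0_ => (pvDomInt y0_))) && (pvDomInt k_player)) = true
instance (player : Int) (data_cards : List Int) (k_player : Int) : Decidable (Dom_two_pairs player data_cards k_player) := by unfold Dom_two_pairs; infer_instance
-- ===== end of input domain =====

-- B replaces A's mark-with-(-1)/re-sort/re-scan passes by a single greedy pass over the
-- descending-sorted ranks that collects pair ranks and single cards (objective: simpler).

-- ===== PORT A =====
-- 'for i in range(6): if dc[i]==dc[i+1]: s=dc[i]; dc[i]=-1; dc[i+1]=-1; break' — data_comb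
-- always has length 7 here, so range(6) visits exactly the adjacent positions; ported as the
-- structural scan of adjacent cells producing the same updated list.
def pvScan1 : List Int → Int × List Int
  | x :: y :: rest =>
      if x = y then (x, -1 :: -1 :: rest)
      else
        let r := pvScan1 (y :: rest)
        (r.1, x :: r.2)
  | l => (0, l)

-- the second loop: the same scan with the extra 'and dc[i] != -1' test
def pvScan2 : List Int → Int × List Int
  | x :: y :: rest =>
      if x = y ∧ x ≠ -1 then (x, -1 :: -1 :: rest)
      else
        let r := pvScan2 (y :: rest)
        (r.1, x :: r.2)
  | l => (0, l)

def two_pairs (player : Int) (data_cards : List Int) (k_player : Int) : Int :=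
  -- the two appends and the 'for i in range(5)' append loop, unrolled over the fixed range
  match PySem.List.pyGet? data_cards (player * 2 - 1),
        PySem.List.pyGet? data_cards (player * 2 - 2),
        PySem.List.pyGet? data_cards (k_player * 2 + 0),
        PySem.List.pyGet? data_cards (k_player * 2 + 1),
        PySem.List.pyGet? data_cards (k_player * 2 + 2),
        PySem.List.pyGet? data_cards (k_player * 2 + 3),
        PySem.List.pyGet? data_cards (k_player * 2 + 4) with
  | some c0, some c1, some c2, some c3, some c4, some c5, some c6 =>
      let comb := [c0, c1, c2, c3, c4, c5, c6]
      let comb := comb.map (fun c => PySem.Int.mod c 13)          -- for i in range(7): dc[i] %= 13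
      let comb := comb.map (fun c => if c = 0 then 13 else c)     -- if dc[i] == 0: dc[i] = 13
      let comb := (PySem.List.sorted comb (fun x => x) false).reverse  -- .sort(); .reverse()
      let r1 := pvScan1 comb
      let s := r1.1
      let comb := (PySem.List.sorted r1.2 (fun x => x) false).reverse
      let r2 := pvScan2 comb
      let a := r2.1
      if a ≠ 0 ∧ s ≠ 0 then
        let comb := (PySem.List.sorted r2.2 (fun x => x) false).reverse
        let s := s * 100
        let s := s + a
        let s := s * 100
        let s := s + PySem.List.pyGetD comb 0 0   -- data_comb[0]; comb has length 7 here, never empty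
        s
      else 0
  | _, _, _, _, _, _, _ => 0   -- IndexError: excluded by Pre_two_pairs

-- ===== PORT B =====
-- 'while rest: take a pair (rest[0] == rest[1]) or a single', accumulating pairs and singles
def pvSplit (pairs singles rest : List Int) : List Int × List Int :=
  match rest with
  | [] => (pairs, singles)
  | [x] => (pairs, singles ++ [x])
  | x :: y :: t =>
      if x = y then pvSplit (pairs ++ [x]) singles t
      else pvSplit pairs (singles ++ [x]) (y :: t)
  termination_by rest.length

def two_pairs_alt (player : Int) (data_cards : List Int) (k_player : Int) : Int :=
  match [player * 2 - 1, player * 2 - 2, k_player * 2, k_player * 2 + 1, k_player * 2 + 2,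
         k_player * 2 + 3, k_player * 2 + 4].mapM (PySem.List.pyGet? data_cards) with
  | some cards =>
      let ranks := cards.map (fun c => if PySem.Int.mod c 13 = 0 then 13 else PySem.Int.mod c 13)  -- (c % 13) or 13
      let ps := pvSplit [] [] (PySem.List.sorted ranks (fun x => x) true)
      match ps.1 with
      | p0 :: p1 :: pr =>
          10000 * p0 + 100 * p1 + (PySem.List.max? (ps.2 ++ pr) (fun x => x)).getD 0
          -- max(singles + pairs[2:]): with two pairs among 7 cards this list is never empty
      | _ => 0   -- len(pairs) < 2
  | none => 0   -- IndexError: excluded by Pre_two_pairs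

-- ===== PRECONDITION & SPEC =====
-- exactly the inputs on which A raises no IndexError: all seven card indices are in range
def Pre_two_pairs (player : Int) (data_cards : List Int) (k_player : Int) : Prop :=
  PySem.Raise.InRange data_cards.length (player * 2 - 1) ∧
  PySem.Raise.InRange data_cards.length (player * 2 - 2) ∧
  PySem.Raise.InRange data_cards.length (k_player * 2) ∧
  PySem.Raise.InRange data_cards.length (k_player * 2 + 1) ∧
  PySem.Raise.InRange data_cards.length (k_player * 2 + 2) ∧
  PySem.Raise.InRange data_cards.length (k_player * 2 + 3) ∧
  PySem.Raise.InRange data_cards.length (k_player * 2 + 4)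
instance (player : Int) (data_cards : List Int) (k_player : Int) : Decidable (Pre_two_pairs player data_cards k_player) := by unfold Pre_two_pairs; infer_instance

def pvWitness_two_pairs : Int × List Int × Int := (1, [1, 15, 3, 16, 5, 29, 7], 1)

def Spec_two_pairs (player : Int) (data_cards : List Int) (k_player : Int) (out : Int) : Prop := out = two_pairs_alt player data_cards k_player
instance (player : Int) (data_cards : List Int) (k_player : Int) (out : Int) : Decidable (Spec_two_pairs player data_cards k_player out) := by unfold Spec_two_pairs; infer_instance

-- ===== CLAIM (what is proved, stated in full; the proofs are below) =====
def Claim_equal_two_pairs : Prop := ∀ (player : Int) (data_cards : List Int) (k_player : Int), Dom_two_pairs player data_cards k_player → Pre_two_pairs player data_cards k_player → Spec_two_pairs player data_cards k_player (two_pairs player data_cards k_player)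

-- ===== LEMMAS AND PROOFS =====

-- recursive (non-accumulator) form of pvSplit, used only in the proofs
def pvGreedy : List Int → List Int × List Int
  | x :: y :: rest =>
      if x = y then
        let r := pvGreedy rest
        (x :: r.1, r.2)
      else
        let r := pvGreedy (y :: rest)
        (r.1, x :: r.2)
  | [x] => ([], [x])
  | [] => ([], [])

lemma pvSplit_eq : ∀ (pairs singles rest : List Int),
    pvSplit pairs singles rest = (pairs ++ (pvGreedy rest).1, singles ++ (pvGreedy rest).2) := by
  intro pairs singles rest
  fun_induction pvSplit pairs singles rest with
  | case1 p s => simp [pvGreedy]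
  | case2 p s x => simp [pvGreedy]
  | case3 p s x t ih => simp [pvGreedy, ih]
  | case4 p s x y t hxy ih => simp [pvGreedy, hxy, ih]

lemma pvGreedy_mem : ∀ (u : List Int) (z : Int), z ∈ u ↔ (z ∈ (pvGreedy u).1 ∨ z ∈ (pvGreedy u).2) := by
  intro u z
  fun_induction pvGreedy u with
  | case1 x t ih => simp [ih]; tauto
  | case2 x y rest _hxy _r ih => simp [ih]; tauto
  | case3 x => simp
  | case4 => simp

lemma pvGreedy_noadj : ∀ {u : List Int}, u.IsChain (· ≠ ·) → pvGreedy u = ([], u) := by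
  intro u h
  induction u using List.twoStepInduction with
  | nil => rfl
  | singleton a => rfl
  | cons_cons a b l ih1 ih2 =>
      rw [List.isChain_cons_cons] at h
      simp [pvGreedy, h.1, ih2 b h.2]


lemma pvScan1_noadj : ∀ {u : List Int}, u.IsChain (· ≠ ·) → pvScan1 u = (0, u) := by
  intro u h
  induction u using List.twoStepInduction with
  | nil => rfl
  | singleton a => rfl
  | cons_cons a b l ih1 ih2 =>
      rw [List.isChain_cons_cons] at h
      simp [pvScan1, h.1, ih2 b h.2]

lemma pvGreedy_decomp : ∀ (pre : List Int) (x : Int) (rest : List Int),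
    (pre ++ [x]).IsChain (· ≠ ·) →
    pvGreedy (pre ++ x :: x :: rest) = (x :: (pvGreedy rest).1, pre ++ (pvGreedy rest).2) := by
  intro pre x rest
  induction pre with
  | nil => intro _; simp [pvGreedy]
  | cons p pr ih =>
      intro h
      simp only [List.cons_append] at h ⊢
      rw [List.isChain_cons] at h
      obtain ⟨hh, ht⟩ := h
      have hrec := ih ht
      cases pr with
      | nil =>
          have hpx : p ≠ x := hh x (by simp)
          simp only [List.nil_append] at hrec
          simp [pvGreedy, hpx]
      | cons q pr' =>
          have hpq : p ≠ q := hh q (by simp)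
          simp only [List.cons_append] at hrec ⊢
          simp [pvGreedy, hpq, hrec]

lemma pvScan1_decomp : ∀ (pre : List Int) (x : Int) (rest : List Int),
    (pre ++ [x]).IsChain (· ≠ ·) →
    pvScan1 (pre ++ x :: x :: rest) = (x, pre ++ -1 :: -1 :: rest) := by
  intro pre x rest
  induction pre with
  | nil => intro _; simp [pvScan1]
  | cons p pr ih =>
      intro h
      simp only [List.cons_append] at h ⊢
      rw [List.isChain_cons] at h
      obtain ⟨hh, ht⟩ := h
      have hrec := ih ht
      cases pr with
      | nil =>
          have hpx : p ≠ x := hh x (by simp)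
          simp only [List.nil_append] at hrec
          simp [pvScan1, hpx]
      | cons q pr' =>
          have hpq : p ≠ q := hh q (by simp)
          simp only [List.cons_append] at hrec ⊢
          simp [pvScan1, hpq, hrec]

lemma pvScan2_eq : ∀ (u : List Int), (∀ z ∈ u, 1 ≤ z) →
    pvScan2 (u ++ [-1, -1]) = ((pvScan1 u).1, (pvScan1 u).2 ++ [-1, -1]) := by
  intro u
  induction u using List.twoStepInduction with
  | nil => intro _; simp [pvScan1, pvScan2]
  | singleton a =>
      intro h
      have ha : (1:Int) ≤ a := h a (by simp)
      have : a ≠ -1 := by omega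
      simp [pvScan1, pvScan2, this]
  | cons_cons a b l ih1 ih2 =>
      intro h
      have ha : (1:Int) ≤ a := h a (by simp)
      by_cases hab : a = b
      · simp [pvScan1, pvScan2, hab, show b ≠ -1 by subst hab; omega]
      · have := ih2 b (fun z hz => h z (by simp at hz ⊢; tauto))
        simp only [List.cons_append] at this ⊢
        simp [pvScan1, pvScan2, hab, this]

lemma sortDescRev_eq {xs ys : List Int} (h : ys.Perm xs) (hp : ys.Pairwise (fun a b : Int => b ≤ a)) :
    (PySem.List.sorted xs (fun x => x) false).reverse = ys := by
  haveI : Std.Antisymm (fun a b : Int => b ≤ a) := ⟨fun a b h1 h2 => le_antisymm h2 h1⟩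
  refine List.Perm.eq_of_pairwise' ?_ hp
    (((PySem.List.sorted xs (fun x => x) false).reverse_perm.trans
      (PySem.List.sorted_perm _ _ _)).trans h.symm)
  have := PySem.List.sorted_pairwise (xs := xs) (key := fun x : Int => x)
  exact (List.pairwise_reverse).mpr (by simpa using this)

lemma sortTrue_eq (xs : List Int) :
    PySem.List.sorted xs (fun x => x) true = (PySem.List.sorted xs (fun x => x) false).reverse := by
  refine (sortDescRev_eq (PySem.List.sorted_perm _ _ _) ?_).symm
  simpa using PySem.List.sorted_pairwise_rev (xs := xs) (key := fun x : Int => x)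

lemma firstPair : ∀ u : List Int, u.IsChain (· ≠ ·) ∨
    ∃ pre x rest, u = pre ++ x :: x :: rest ∧ (pre ++ [x]).IsChain (· ≠ ·) := by
  intro u
  induction u with
  | nil => left; exact List.isChain_nil
  | cons x t ih =>
      cases t with
      | nil => left; exact List.isChain_singleton x
      | cons y t' =>
          by_cases hxy : x = y
          · right
            exact ⟨[], x, t', by simp [hxy], List.isChain_singleton x⟩
          · rcases ih with hch | ⟨pre, z, rest, heq, hch⟩
            · left; exact List.isChain_cons_cons.mpr ⟨hxy, hch⟩
            · right
              refine ⟨x :: pre, z, rest, by simp [heq], ?_⟩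
              rw [List.cons_append, List.isChain_cons]
              refine ⟨?_, hch⟩
              intro w hw
              cases pre with
              | nil => simp at hw heq; omega
              | cons p pr => simp at hw heq; omega
lemma core_eq (u : List Int) (hp : u.Pairwise (fun a b : Int => b ≤ a))
    (h1 : ∀ z ∈ u, 1 ≤ z) (hlen : u.length = 7) :
    (if (pvScan2 ((PySem.List.sorted (pvScan1 u).2 (fun x => x) false).reverse)).1 ≠ 0 ∧
        (pvScan1 u).1 ≠ 0 then
      ((pvScan1 u).1 * 100 +
        (pvScan2 ((PySem.List.sorted (pvScan1 u).2 (fun x => x) false).reverse)).1) * 100 +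
        PySem.List.pyGetD ((PySem.List.sorted
          (pvScan2 ((PySem.List.sorted (pvScan1 u).2 (fun x => x) false).reverse)).2
          (fun x => x) false).reverse) 0 0
    else 0) =
    (match (pvSplit [] [] u).1 with
     | p0 :: p1 :: pr => 10000 * p0 + 100 * p1 +
         (PySem.List.max? ((pvSplit [] [] u).2 ++ pr) (fun x => x)).getD 0
     | _ => 0) := by
  rcases firstPair u with hch | ⟨pre, x, rest, rfl, hch⟩
  · rw [pvScan1_noadj hch, pvSplit_eq, pvGreedy_noadj hch]
    simp
  · have hx1 : (1:Int) ≤ x := h1 x (by simp)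
    have hchpre : pre.IsChain (· ≠ ·) := (List.isChain_append.mp hch).1
    have hcross : ∀ a ∈ pre, ∀ b ∈ x :: x :: rest, b ≤ a := (List.pairwise_append.mp hp).2.2
    have hright : (x :: x :: rest).Pairwise (fun a b : Int => b ≤ a) :=
      (List.pairwise_append.mp hp).2.1
    have hxrest : ∀ b ∈ rest, b ≤ x :=
      fun b hb => (List.pairwise_cons.mp hright).1 b (by simp [hb])
    have hgt : ∀ a ∈ pre.getLast?, x < a := by
      intro a ha
      have hamem : a ∈ pre := List.mem_of_getLast? ha
      have hne : a ≠ x := (List.isChain_append.mp hch).2.2 a ha x (by simp)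
      have := hcross a hamem x (by simp)
      omega
    have h1v : ∀ z ∈ pre ++ rest, 1 ≤ z := by
      intro z hz
      exact h1 z (by simp at hz ⊢; tauto)
    have hsubv : (pre ++ rest).Sublist (pre ++ x :: x :: rest) :=
      List.Sublist.append_left
        ((List.sublist_cons_self x rest).trans (List.sublist_cons_self x (x :: rest))) pre
    have hpv : (pre ++ rest).Pairwise (fun a b : Int => b ≤ a) := hp.sublist hsubv
    have hsort1 : (PySem.List.sorted (pre ++ -1 :: -1 :: rest) (fun x => x) false).reverse
        = (pre ++ rest) ++ [-1, -1] := by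
      apply sortDescRev_eq
      · rw [List.append_assoc]
        exact List.Perm.append_left pre List.perm_append_comm
      · rw [List.pairwise_append]
        refine ⟨hpv, by simp, ?_⟩
        intro a ha b hb
        have := h1v a ha
        simp at hb
        omega
    rw [pvScan1_decomp pre x rest hch, hsort1, pvScan2_eq (pre ++ rest) h1v]
    rw [pvSplit_eq, pvGreedy_decomp pre x rest hch]
    rcases firstPair rest with hch2 | ⟨pre3, y, rest2, hreq, hch2⟩
    · -- only one pair in u
      have hchv : (pre ++ rest).IsChain (· ≠ ·) := by
        rw [List.isChain_append]
        refine ⟨hchpre, hch2, ?_⟩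
        intro a ha b hb
        have h1 := hgt a ha
        have h2 := hxrest b (List.mem_of_head? hb)
        omega
      rw [pvScan1_noadj hchv, pvGreedy_noadj hch2]
      simp
    · -- two pairs
      subst hreq
      have hy1 : (1:Int) ≤ y := h1 y (by simp)
      have hch3 : ((pre ++ pre3) ++ [y]).IsChain (· ≠ ·) := by
        rw [List.append_assoc, List.isChain_append]
        refine ⟨hchpre, hch2, ?_⟩
        intro a ha b hb
        have hlt := hgt a ha
        have hbm : b ∈ pre3 ++ y :: y :: rest2 := by
          have := List.mem_of_head? hb
          simp at this ⊢
          tauto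
        have := hxrest b hbm
        omega
      have hassoc : pre ++ (pre3 ++ y :: y :: rest2) = (pre ++ pre3) ++ y :: y :: rest2 := by
        simp [List.append_assoc]
      rw [hassoc, pvScan1_decomp (pre ++ pre3) y rest2 hch3,
          pvGreedy_decomp pre3 y rest2 hch2]
      have hL : ((pre ++ pre3) ++ rest2).Sublist ((pre ++ pre3) ++ y :: y :: rest2) :=
        List.Sublist.append_left
          ((List.sublist_cons_self y rest2).trans (List.sublist_cons_self y (y :: rest2))) _
      have hpL : ((pre ++ pre3) ++ rest2).Pairwise (fun a b : Int => b ≤ a) := by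
        refine List.Pairwise.sublist hL ?_
        rw [← hassoc]
        exact hpv
      have h1L : ∀ z ∈ (pre ++ pre3) ++ rest2, 1 ≤ z := by
        intro z hz
        apply h1v
        simp at hz ⊢
        tauto
      have hsort2 : (PySem.List.sorted (((pre ++ pre3) ++ -1 :: -1 :: rest2) ++ [-1, -1])
            (fun x => x) false).reverse = ((pre ++ pre3) ++ rest2) ++ [-1, -1, -1, -1] := by
        apply sortDescRev_eq
        · simp only [List.append_assoc]
          refine List.Perm.append_left pre (List.Perm.append_left pre3 ?_)
          have h4 : ([-1, -1, -1, -1] : List Int) = [-1, -1] ++ [-1, -1] := rfl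
          rw [h4, ← List.append_assoc]
          refine List.perm_append_comm.trans ?_
          simp
        · rw [List.pairwise_append]
          refine ⟨hpL, by simp, ?_⟩
          intro a ha b hb
          have := h1L a ha
          simp at hb
          omega
      have hlen3 : ((pre ++ pre3) ++ rest2).length = 3 := by
        simp at hlen ⊢
        omega
      obtain ⟨l0, L', hLeq⟩ : ∃ l0 L', (pre ++ pre3) ++ rest2 = l0 :: L' := by
        cases hc : (pre ++ pre3) ++ rest2 with
        | nil => rw [hc] at hlen3; simp at hlen3
        | cons a b => exact ⟨a, b, rfl⟩
      have hhead : ∀ z ∈ (pre ++ pre3) ++ rest2, z ≤ l0 := by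
        intro z hz
        rw [hLeq] at hz hpL
        rcases List.mem_cons.mp hz with h | h
        · omega
        · exact List.rel_of_pairwise_cons hpL h
      have hMm : ∀ z : Int,
          z ∈ (pre ++ (pre3 ++ (pvGreedy rest2).2)) ++ (pvGreedy rest2).1 ↔
          z ∈ (pre ++ pre3) ++ rest2 := by
        intro z
        have := pvGreedy_mem rest2 z
        simp [List.mem_append]
        tauto
      obtain ⟨m, hm⟩ : ∃ m, PySem.List.max?
          ((pre ++ (pre3 ++ (pvGreedy rest2).2)) ++ (pvGreedy rest2).1) (fun x => x) = some m := by
        cases hc : PySem.List.max? ((pre ++ (pre3 ++ (pvGreedy rest2).2)) ++ (pvGreedy rest2).1)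
            (fun x => x) with
        | none =>
            rw [PySem.List.max?_eq_none_iff] at hc
            have : (l0 : Int) ∈ ([] : List Int) := by
              rw [← hc]  -- membership transport
              exact (hMm l0).mpr (by rw [hLeq]; simp)
            simp at this
        | some m => exact ⟨m, rfl⟩
      have hm1 : m ∈ (pre ++ pre3) ++ rest2 := (hMm m).mp (PySem.List.max?_mem hm)
      have hml0 : m = l0 := by
        have h1' := hhead m hm1
        have h2' := PySem.List.max?_isMax hm l0 ((hMm l0).mpr (by rw [hLeq]; simp))
        simp at h2'
        omega
      simp only [List.nil_append]
      rw [if_pos ⟨by omega, by omega⟩]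
      rw [hsort2, hm, hml0, hLeq]
      simp only [List.cons_append, PySem.List.pyGetD_zero_cons, Option.getD_some]
      ring

lemma rank_ge_one (c : Int) : 1 ≤ (if PySem.Int.mod c 13 = 0 then 13 else PySem.Int.mod c 13) := by
  have h0 : (0:Int) ≤ PySem.Int.mod c 13 := PySem.Int.mod_nonneg c (by norm_num)
  split_ifs with h
  · norm_num
  · omega

-- ===== VERDICT (by name: the statement is the Claim_ definition above) =====
theorem two_pairs_spec : Claim_equal_two_pairs := by
  intro player data_cards k_player _hdom hpre
  obtain ⟨i0, i1, i2, i3, i4, i5, i6⟩ := hpre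
  have hget : ∀ i : Int, PySem.Raise.InRange data_cards.length i →
      ∃ c, PySem.List.pyGet? data_cards i = some c := by
    intro i hi
    cases hc : PySem.List.pyGet? data_cards i with
    | none => exact absurd hi ((PySem.List.pyGet?_eq_none_iff _ _).mp hc)
    | some c => exact ⟨c, rfl⟩
  obtain ⟨c0, h0⟩ := hget _ i0
  obtain ⟨c1, h1⟩ := hget _ i1
  obtain ⟨c2, h2⟩ := hget _ i2
  obtain ⟨c3, h3⟩ := hget _ i3
  obtain ⟨c4, h4⟩ := hget _ i4
  obtain ⟨c5, h5⟩ := hget _ i5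
  obtain ⟨c6, h6⟩ := hget _ i6
  unfold Spec_two_pairs two_pairs two_pairs_alt
  rw [show k_player * 2 + 0 = k_player * 2 by ring, h0, h1, h2, h3, h4, h5, h6]
  simp only [List.mapM_cons, List.mapM_nil, h0, h1, h2, h3, h4, h5, h6, Option.bind_eq_bind,
    Option.bind_some, Option.pure_def, List.map_cons, List.map_nil]
  rw [sortTrue_eq]
  refine core_eq _ ?_ ?_ ?_
  · exact List.pairwise_reverse.mpr (by
      simpa using PySem.List.sorted_pairwise (xs := _) (key := fun x : Int => x))
  · intro z hz
    rw [List.mem_reverse, PySem.List.mem_sorted] at hz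
    simp only [List.mem_cons, List.not_mem_nil, or_false] at hz
    rcases hz with h | h | h | h | h | h | h <;> rw [h] <;> exact rank_ge_one _
  · simp [PySem.List.length_sorted]
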